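-- pv_equiv track=rewrite | github.com/index-login/pythonncode | Sine之舞.py | _An
-- ===== SOURCE A (Python) =====
-- def _An(n):
--     #3
--     #( (sin(1)+3)  sin(1-sin(2))+2)  sin(1-sin(2+sin(3)))+1
--     #sin(1-sin(2+sin(3)))  3
--     #sin(1-sin(2))         2
--     #sin(1)                1
--     if n>1:
--         str1 = str(n)
--         while n >1:
--             str1 = "sin(" + str1 + ")"
--             n-=1
--             if n % 2 == 0:
--                 str1 = str(n) + "+" + str1
--             else:
--                 str1 = str(n) + "-" + str1
--         else:
--             str1="sin(" + str1 + ")"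
--     else:
--         str1="sin(1)"
--     return str1
-- ===== SOURCE B (Python) =====
-- def _An(n):
--     if n <= 1:
--         return "sin(1)"
--     parts = ["sin(" + str(k) + ("+" if k % 2 == 0 else "-") for k in range(1, n)]
--     parts.append("sin(" + str(n) + ")")
--     parts.append(")" * (n - 1))
--     return "".join(parts)
-- ===== Notes on version B (the rewrite author's own statement) =====
-- stated objective: faster
-- what changed: Replaces the downward prepend-and-wrap while loop (quadratic repeated string concatenation) by a flat build: join the opening segments sin(k+/- for k=1..n-1, then sin(n), then n-1 closing parentheses, concatenated once.
import Mathlib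
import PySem

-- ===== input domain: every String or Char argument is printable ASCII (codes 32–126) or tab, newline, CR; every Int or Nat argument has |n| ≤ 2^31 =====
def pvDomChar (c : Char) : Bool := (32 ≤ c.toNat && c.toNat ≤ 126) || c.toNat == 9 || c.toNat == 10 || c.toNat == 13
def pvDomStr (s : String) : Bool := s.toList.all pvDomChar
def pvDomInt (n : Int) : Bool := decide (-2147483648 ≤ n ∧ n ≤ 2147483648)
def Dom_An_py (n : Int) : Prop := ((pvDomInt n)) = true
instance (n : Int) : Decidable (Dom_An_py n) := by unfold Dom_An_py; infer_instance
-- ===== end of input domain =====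

-- B builds the expression flat — opening segments joined once, then sin(n), then a run of closing parens — instead of A's prepend-and-wrap while loop.

-- ===== PORT A =====
-- the while loop of A: state (n, str1); terminates because n strictly decreases while n > 1
def An_py_loop (n : Int) (str1 : String) : String :=
  if _h : n > 1 then
    let s := "sin(" ++ str1 ++ ")"
    let n' := n - 1
    let s' := if PySem.Int.mod n' 2 == 0 then PySem.Int.toStr n' ++ "+" ++ s
              else PySem.Int.toStr n' ++ "-" ++ s
    An_py_loop n' s'
  else
    -- Python's while-else: runs after the loop condition fails (A's loop has no break)
    "sin(" ++ str1 ++ ")"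
termination_by n.toNat
decreasing_by omega

def An_py (n : Int) : String :=
  if n > 1 then An_py_loop n (PySem.Int.toStr n) else "sin(1)"

-- ===== PORT B =====
def An_py_alt (n : Int) : String :=
  if n ≤ 1 then "sin(1)"
  else
    let parts := (PySem.List.pyRange 1 n 1).map (fun k =>
      "sin(" ++ PySem.Int.toStr k ++ (if PySem.Int.mod k 2 == 0 then "+" else "-"))
    let parts := parts ++ ["sin(" ++ PySem.Int.toStr n ++ ")"]
    -- ")" * (n - 1): hand port of Python's str * int, exact here since n - 1 ≥ 0
    let parts := parts ++ [String.ofList (List.replicate (n - 1).toNat ')')]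
    PySem.Str.join "" parts

-- ===== PRECONDITION & SPEC =====
def Spec_An_py (n : Int) (out : String) : Prop := out = An_py_alt n
instance (n : Int) (out : String) : Decidable (Spec_An_py n out) := by unfold Spec_An_py; infer_instance

-- ===== CLAIM (what is proved, stated in full; the proofs are below) =====
def Claim_equal_An_py : Prop := ∀ (n : Int), Dom_An_py n → Spec_An_py n (An_py n)

-- ===== LEMMAS AND PROOFS =====

-- one opening segment of B
def pvSeg (k : Int) : String :=
  "sin(" ++ PySem.Int.toStr k ++ (if PySem.Int.mod k 2 == 0 then "+" else "-")

theorem pv_join_empty_cons (a : String) (l : List String) :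
    PySem.Str.join "" (a :: l) = a ++ PySem.Str.join "" l := by
  cases l <;> simp [PySem.Str.join, PySem.Chars.join, List.intercalate,
    String.ofList_append, String.ofList_toList]

theorem pv_join_snoc (xs : List String) (x : String) :
    PySem.Str.join "" (xs ++ [x]) = PySem.Str.join "" xs ++ x := by
  induction xs with
  | nil => simp [PySem.Str.join, PySem.Chars.join, List.intercalate, String.ofList_toList]
  | cons a t ih => rw [List.cons_append, pv_join_empty_cons, pv_join_empty_cons, ih, String.append_assoc]

theorem pv_rep_succ (j : ℕ) :
    String.ofList (List.replicate (j+1) ')') = ")" ++ String.ofList (List.replicate j ')') := by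
  rw [List.replicate_succ, show (')' :: List.replicate j ')') = [')'] ++ List.replicate j ')' from rfl,
    String.ofList_append]

-- invariant of A's loop: the result is B's flat decomposition
theorem pv_loop_char (j : ℕ) : ∀ (s : String),
    An_py_loop ((j : Int) + 1) s =
      PySem.Str.join "" ((PySem.List.pyRange 1 ((j : Int) + 1) 1).map pvSeg)
        ++ ("sin(" ++ s ++ ")") ++ String.ofList (List.replicate j ')') := by
  induction j with
  | zero =>
    intro s
    rw [An_py_loop, dif_neg (by omega)]
    norm_num
    simp [PySem.Str.join, PySem.Chars.join, List.intercalate]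
  | succ j ih =>
    intro s
    push_cast
    rw [An_py_loop, dif_pos (by omega : (j : Int) + 1 + 1 > 1)]
    simp only
    have harg : ((j : Int) + 1 + 1 - 1) = (j : Int) + 1 := by omega
    rw [harg]
    rw [ih]
    rw [PySem.List.pyRange_one_succ_right (by omega : (1:Int) ≤ (j:Int)+1), List.map_append,
      List.map_cons, List.map_nil, pv_join_snoc, pv_rep_succ]
    unfold pvSeg
    have hpar : ∀ (t : String), ("))" : String) ++ t = ")" ++ (")" ++ t) := by
      intro t
      have h2 : (")" : String) ++ ")" = "))" := by decide
      rw [← String.append_assoc, h2]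
    split_ifs <;> simp [String.append_assoc, hpar]

-- ===== VERDICT (by name: the statement is the Claim_ definition above) =====
theorem An_py_spec : Claim_equal_An_py := by
  intro n _
  unfold Spec_An_py An_py An_py_alt
  by_cases h : n > 1
  · rw [if_pos h, if_neg (by omega)]
    have hj : (((n - 1).toNat : Int)) + 1 = n := by omega
    have hc := pv_loop_char (n - 1).toNat (PySem.Int.toStr n)
    rw [hj] at hc
    rw [hc, pv_join_snoc, pv_join_snoc]
    rfl
  · rw [if_neg h, if_pos (by omega)]
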